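-- pv_equiv track=rewrite | github.com/JongoDB/verbatim-studio | packages/backend/services/quality_review.py | _expand_flagged_with_context
-- ===== SOURCE A (Python) =====
-- CONTEXT_RADIUS = 2
--
-- def _expand_flagged_with_context(
--     flagged: set[int],
--     total: int,
--     radius: int = CONTEXT_RADIUS,
-- ) -> list[int]:
--     """Expand flagged indices to include context neighbors, return sorted list."""
--     expanded: set[int] = set()
--     for i in flagged:
--         for offset in range(-radius, radius + 1):
--             j = i + offset
--             if 0 <= j < total:
--                 expanded.add(j)
--     return sorted(expanded)
-- ===== SOURCE B (Python) =====
-- CONTEXT_RADIUS = 2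
--
--
-- def _expand_flagged_with_context(
--     flagged: set[int],
--     total: int,
--     radius: int = CONTEXT_RADIUS,
-- ) -> list[int]:
--     """Expand flagged indices to include context neighbors, return sorted list.
--
--     Single sweep over the sorted flags: each flag contributes the clamped
--     interval [max(i - radius, next_free), min(i + radius, total - 1)], where
--     next_free is one past the last index already emitted, so overlapping or
--     touching neighborhoods coalesce and the output comes out sorted directly.
--     """
--     result: list[int] = []
--     next_free = 0
--     for i in sorted(flagged):
--         lo = max(i - radius, next_free)
--         hi = min(i + radius, total - 1)
--         if lo <= hi:
--             result.extend(range(lo, hi + 1))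
--             next_free = hi + 1
--     return result
-- ===== Notes on version B (the rewrite author's own statement) =====
-- stated objective: faster
-- what changed: Instead of inserting every neighbor of every flag into a set and sorting it, B sorts the flags once and sweeps them left to right, emitting each flag's clamped interval above a 'next_free' cursor, so coalesced ranges come out already sorted and deduplicated.
import Mathlib
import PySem

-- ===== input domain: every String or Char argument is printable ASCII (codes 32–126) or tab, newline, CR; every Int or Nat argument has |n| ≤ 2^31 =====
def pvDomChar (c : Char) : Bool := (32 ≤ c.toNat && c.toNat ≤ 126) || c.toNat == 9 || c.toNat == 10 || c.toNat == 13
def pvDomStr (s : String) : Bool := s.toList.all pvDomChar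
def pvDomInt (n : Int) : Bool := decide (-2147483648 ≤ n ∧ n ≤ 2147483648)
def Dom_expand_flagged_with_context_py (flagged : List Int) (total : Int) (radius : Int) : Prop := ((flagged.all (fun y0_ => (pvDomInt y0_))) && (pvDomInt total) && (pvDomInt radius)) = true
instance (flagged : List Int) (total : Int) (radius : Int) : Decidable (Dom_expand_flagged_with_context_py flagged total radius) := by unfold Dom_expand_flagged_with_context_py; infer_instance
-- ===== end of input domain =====

-- B replaces "insert every neighbor of every flag into a set, then sort" by a single
-- left-to-right sweep over the sorted flags that emits coalesced clamped intervals,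
-- so the output is produced already sorted and deduplicated (objective: faster; the
-- timing run measured B faster at the largest generated size).

-- ===== PORT A =====
def expand_flagged_with_context_py (flagged : List Int) (total : Int) (radius : Int) : List Int :=
  let expanded : PySem.Set Int :=
    flagged.foldl (fun expanded i =>
      (PySem.List.pyRange (-radius) (radius + 1) 1).foldl (fun expanded offset =>
        let j := i + offset
        if 0 ≤ j ∧ j < total then expanded.add j else expanded) expanded)
      PySem.Set.empty
  PySem.List.sorted expanded (fun x => x) false

-- ===== PORT B =====
def expand_flagged_with_context_py_alt (flagged : List Int) (total : Int) (radius : Int) : List Int :=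
  ((PySem.List.sorted flagged (fun x => x) false).foldl
    (fun (st : List Int × Int) i =>
      let lo := max (i - radius) st.2
      let hi := min (i + radius) (total - 1)
      if lo ≤ hi then (st.1 ++ PySem.List.pyRange lo (hi + 1) 1, hi + 1) else st)
    ([], 0)).1

-- ===== PRECONDITION & SPEC =====
def Spec_expand_flagged_with_context_py (flagged : List Int) (total : Int) (radius : Int) (out : List Int) : Prop := out = expand_flagged_with_context_py_alt flagged total radius
instance (flagged : List Int) (total : Int) (radius : Int) (out : List Int) : Decidable (Spec_expand_flagged_with_context_py flagged total radius out) := by unfold Spec_expand_flagged_with_context_py; infer_instance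

-- ===== CLAIM (what is proved, stated in full; the proofs are below) =====
def Claim_equal_expand_flagged_with_context_py : Prop := ∀ (flagged : List Int) (total : Int) (radius : Int), Dom_expand_flagged_with_context_py flagged total radius → Spec_expand_flagged_with_context_py flagged total radius (expand_flagged_with_context_py flagged total radius)

-- ===== LEMMAS AND PROOFS =====

-- the canonical answer both ports are proved equal to: the in-range indices within
-- `radius` of some flag, in increasing order
def pvNear (flagged : List Int) (radius j : Int) : Bool :=
  flagged.any (fun i => decide (i - radius ≤ j) && decide (j ≤ i + radius))

def pvCanon (flagged : List Int) (total radius : Int) : List Int :=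
  (PySem.List.pyRange 0 total 1).filter (fun j => pvNear flagged radius j)

-- ---- A side ----

lemma innerA_mem (total i : Int) :
    ∀ (l : List Int) (s : PySem.Set Int) (j : Int),
      j ∈ l.foldl (fun expanded offset =>
            let j := i + offset
            if 0 ≤ j ∧ j < total then expanded.add j else expanded) s
        ↔ j ∈ s ∨ ∃ o ∈ l, j = i + o ∧ 0 ≤ j ∧ j < total := by
  intro l
  induction l with
  | nil => intro s j; simp [List.foldl]
  | cons o l ih =>
      intro s j
      simp only [List.foldl_cons]
      rw [ih]
      by_cases h : 0 ≤ i + o ∧ i + o < total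
      · rw [if_pos h, PySem.Set.mem_add]
        simp only [List.mem_cons]
        constructor
        · rintro (⟨hj | rfl⟩ | ⟨o', ho', rfl, hb⟩)
          · exact Or.inl hj
          · exact Or.inr ⟨o, Or.inl rfl, rfl, h⟩
          · exact Or.inr ⟨o', Or.inr ho', rfl, hb⟩
        · rintro (hj | ⟨o', (rfl | ho'), rfl, hb⟩)
          · exact Or.inl (Or.inl hj)
          · exact Or.inl (Or.inr rfl)
          · exact Or.inr ⟨o', ho', rfl, hb⟩
      · rw [if_neg h]
        simp only [List.mem_cons]
        constructor
        · rintro (hj | ⟨o', ho', rfl, hb⟩)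
          · exact Or.inl hj
          · exact Or.inr ⟨o', Or.inr ho', rfl, hb⟩
        · rintro (hj | ⟨o', (rfl | ho'), rfl, hb⟩)
          · exact Or.inl hj
          · exact absurd hb h
          · exact Or.inr ⟨o', ho', rfl, hb⟩

lemma innerA_nodup (total i : Int) :
    ∀ (l : List Int) (s : PySem.Set Int), s.Nodup →
      (l.foldl (fun expanded offset =>
          let j := i + offset
          if 0 ≤ j ∧ j < total then expanded.add j else expanded) s).Nodup := by
  intro l
  induction l with
  | nil => intro s hs; simpa [List.foldl] using hs
  | cons o l ih =>
      intro s hs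
      simp only [List.foldl_cons]
      apply ih
      by_cases h : 0 ≤ i + o ∧ i + o < total
      · rw [if_pos h]; exact PySem.Set.nodup_add _ _ hs
      · rw [if_neg h]; exact hs

lemma outerA_mem (total radius : Int) :
    ∀ (l : List Int) (s : PySem.Set Int) (j : Int),
      j ∈ l.foldl (fun expanded i =>
            (PySem.List.pyRange (-radius) (radius + 1) 1).foldl (fun expanded offset =>
              let j := i + offset
              if 0 ≤ j ∧ j < total then expanded.add j else expanded) expanded) s
        ↔ j ∈ s ∨ ∃ i ∈ l, i - radius ≤ j ∧ j ≤ i + radius ∧ 0 ≤ j ∧ j < total := by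
  intro l
  induction l with
  | nil => intro s j; simp [List.foldl]
  | cons i l ih =>
      intro s j
      simp only [List.foldl_cons]
      rw [ih]
      rw [innerA_mem total i]
      constructor
      · rintro ((hj | ⟨o, ho, rfl, hb⟩) | ⟨i', hi', h1, h2, hb⟩)
        · exact Or.inl hj
        · rw [PySem.List.mem_pyRange_one] at ho
          exact Or.inr ⟨i, List.mem_cons_self, by omega, by omega, hb⟩
        · exact Or.inr ⟨i', List.mem_cons_of_mem _ hi', h1, h2, hb⟩
      · rintro (hj | ⟨i', hi', h1, h2, hb⟩)
        · exact Or.inl (Or.inl hj)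
        · rcases List.mem_cons.mp hi' with rfl | hi'
          · refine Or.inl (Or.inr ⟨j - i', ?_, by omega, hb⟩)
            rw [PySem.List.mem_pyRange_one]; omega
          · exact Or.inr ⟨i', hi', h1, h2, hb⟩

lemma outerA_nodup (total radius : Int) :
    ∀ (l : List Int) (s : PySem.Set Int), s.Nodup →
      (l.foldl (fun expanded i =>
          (PySem.List.pyRange (-radius) (radius + 1) 1).foldl (fun expanded offset =>
            let j := i + offset
            if 0 ≤ j ∧ j < total then expanded.add j else expanded) expanded) s).Nodup := by
  intro l
  induction l with
  | nil => intro s hs; simpa [List.foldl] using hs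
  | cons i l ih =>
      intro s hs
      simp only [List.foldl_cons]
      exact ih _ (innerA_nodup total i _ s hs)

lemma canon_mem (flagged : List Int) (total radius j : Int) :
    j ∈ pvCanon flagged total radius
      ↔ ∃ i ∈ flagged, i - radius ≤ j ∧ j ≤ i + radius ∧ 0 ≤ j ∧ j < total := by
  unfold pvCanon pvNear
  simp only [List.mem_filter, PySem.List.mem_pyRange_one, List.any_eq_true, Bool.and_eq_true,
    decide_eq_true_eq]
  constructor
  · rintro ⟨⟨h0, ht⟩, i, hi, h1, h2⟩
    exact ⟨i, hi, h1, h2, h0, ht⟩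
  · rintro ⟨i, hi, h1, h2, h0, ht⟩
    exact ⟨⟨h0, ht⟩, i, hi, h1, h2⟩

lemma canon_nodup (flagged : List Int) (total radius : Int) :
    (pvCanon flagged total radius).Nodup :=
  (PySem.List.nodup_pyRange_one 0 total).filter _

lemma canon_pairwise_lt (flagged : List Int) (total radius : Int) :
    (pvCanon flagged total radius).Pairwise (· < ·) :=
  (PySem.List.pairwise_lt_pyRange_one 0 total).filter _

lemma portA_eq_canon (flagged : List Int) (total radius : Int) :
    expand_flagged_with_context_py flagged total radius = pvCanon flagged total radius := by
  unfold expand_flagged_with_context_py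
  apply PySem.List.sorted_eq_of_perm_of_pairwise_lt
  · refine (List.perm_ext_iff_of_nodup (canon_nodup _ _ _) ?_).mpr ?_
    · exact outerA_nodup total radius flagged PySem.Set.empty (by simp [PySem.Set.empty])
    · intro j
      rw [canon_mem, outerA_mem total radius flagged PySem.Set.empty j]
      simp [PySem.Set.empty]
  · exact canon_pairwise_lt flagged total radius

-- ---- B side ----

lemma sweep (total radius : Int) :
    ∀ (s : List Int), s.Pairwise (· ≤ ·) → ∀ (acc : List Int) (nf : Int), 0 ≤ nf →
      (s.foldl (fun (st : List Int × Int) i =>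
          let lo := max (i - radius) st.2
          let hi := min (i + radius) (total - 1)
          if lo ≤ hi then (st.1 ++ PySem.List.pyRange lo (hi + 1) 1, hi + 1) else st)
        (acc, nf)).1
      = acc ++ (PySem.List.pyRange nf total 1).filter (fun j => pvNear s radius j) := by
  intro s
  induction s with
  | nil =>
      intro _ acc nf _
      simp [List.foldl, pvNear]
  | cons i s ih =>
      intro hp acc nf hnf
      have hmin : ∀ i' ∈ s, i ≤ i' := fun i' h => (List.pairwise_cons.mp hp).1 i' h
      have hps : s.Pairwise (· ≤ ·) := (List.pairwise_cons.mp hp).2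
      simp only [List.foldl_cons]
      by_cases h : max (i - radius) nf ≤ min (i + radius) (total - 1)
      · simp only [h, if_pos]
        rw [ih hps _ _ (by omega)]
        have hsplit : PySem.List.pyRange nf total 1
            = PySem.List.pyRange nf (max (i - radius) nf) 1
              ++ PySem.List.pyRange (max (i - radius) nf) (min (i + radius) (total - 1) + 1) 1
              ++ PySem.List.pyRange (min (i + radius) (total - 1) + 1) total 1 := by
          rw [← PySem.List.pyRange_one_append nf (max (i - radius) nf)
                (min (i + radius) (total - 1) + 1) (by omega) (by omega),
              ← PySem.List.pyRange_one_append nf (min (i + radius) (total - 1) + 1) total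
                (by omega) (by omega)]
        rw [hsplit, List.filter_append, List.filter_append]
        have h1 : (PySem.List.pyRange nf (max (i - radius) nf) 1).filter
            (fun j => pvNear (i :: s) radius j) = [] := by
          apply List.filter_eq_nil_iff.mpr
          intro j hj
          rw [PySem.List.mem_pyRange_one] at hj
          unfold pvNear
          simp only [List.any_cons, Bool.or_eq_true, List.any_eq_true, Bool.and_eq_true,
            decide_eq_true_eq, not_or]
          constructor
          · omega
          · rintro ⟨i', hi', h1, h2⟩
            have := hmin i' hi'
            omega
        have h2 : (PySem.List.pyRange (max (i - radius) nf) (min (i + radius) (total - 1) + 1)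
              1).filter (fun j => pvNear (i :: s) radius j)
            = PySem.List.pyRange (max (i - radius) nf) (min (i + radius) (total - 1) + 1) 1 := by
          apply List.filter_eq_self.mpr
          intro j hj
          rw [PySem.List.mem_pyRange_one] at hj
          unfold pvNear
          simp only [List.any_cons, Bool.or_eq_true, Bool.and_eq_true, decide_eq_true_eq]
          left
          omega
        have h3 : (PySem.List.pyRange (min (i + radius) (total - 1) + 1) total 1).filter
              (fun j => pvNear (i :: s) radius j)
            = (PySem.List.pyRange (min (i + radius) (total - 1) + 1) total 1).filter
              (fun j => pvNear s radius j) := by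
          apply List.filter_congr
          intro j hj
          rw [PySem.List.mem_pyRange_one] at hj
          simp only [pvNear, List.any_cons]
          have hfalse : (decide (i - radius ≤ j) && decide (j ≤ i + radius)) = false := by
            rw [← Bool.decide_and, decide_eq_false_iff_not]; omega
          rw [hfalse, Bool.false_or]
        rw [h1, h2, h3]
        simp [List.append_assoc]
      · simp only [h, if_neg, not_false_iff]
        rw [ih hps _ _ hnf]
        congr 1
        apply List.filter_congr
        intro j hj
        rw [PySem.List.mem_pyRange_one] at hj
        simp only [pvNear, List.any_cons]
        have hfalse : (decide (i - radius ≤ j) && decide (j ≤ i + radius)) = false := by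
          rw [← Bool.decide_and, decide_eq_false_iff_not]; omega
        rw [hfalse, Bool.false_or]

lemma near_sorted (flagged : List Int) (radius j : Int) :
    pvNear (PySem.List.sorted flagged (fun x => x) false) radius j = pvNear flagged radius j := by
  unfold pvNear
  exact (PySem.List.sorted_perm flagged (fun x => x) false).any_eq

lemma portB_eq_canon (flagged : List Int) (total radius : Int) :
    expand_flagged_with_context_py_alt flagged total radius = pvCanon flagged total radius := by
  unfold expand_flagged_with_context_py_alt pvCanon
  rw [sweep total radius _ ?_ [] 0 le_rfl]
  · rw [List.nil_append]
    apply List.filter_congr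
    intro j _
    exact near_sorted flagged radius j
  · have := PySem.List.sorted_pairwise flagged (fun x => x) (κ := Int)
    simpa using this

-- ===== VERDICT (by name: the statement is the Claim_ definition above) =====
theorem expand_flagged_with_context_py_spec : Claim_equal_expand_flagged_with_context_py := by
  intro flagged total radius _
  unfold Spec_expand_flagged_with_context_py
  rw [portA_eq_canon, portB_eq_canon]
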